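-- pv_equiv track=rewrite | github.com/itsarvindhere/binary-tree | 052. Smallest String Starting From Leaf/IterativeDFS.py | isSmaller
-- ===== SOURCE A (Python) =====
-- def isSmaller(string1, string2):
--
--     # If the string2 does not exist
--     if not string2: return True
--
--     # Lengths
--     m,n = len(string1), len(string2)
--
--     i = m - 1
--     j = 0
--
--     while i >= 0 and j < n:
--
--         # Compare the characters
--         if string1[i] < string2[j]: return True
--         elif string1[i] > string2[j]: return False
--         else:
--             i -= 1
--             j += 1
--
--     # If string1 is a shorter prefix of string2, return True
--     return True if i < 0 else False
-- ===== SOURCE B (Python) =====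
-- def isSmaller(string1, string2):
--     # Empty string2: mirror A's explicit "string2 does not exist" case.
--     if not string2:
--         return True
--     # Lexicographic comparison of reversed string1 against string2,
--     # done by Python's built-in string comparison instead of manual indices.
--     return string1[::-1] <= string2
-- ===== Notes on version B (the rewrite author's own statement) =====
-- stated objective: simpler
-- what changed: Replaced the manual two-index while loop over string1 (backwards) and string2 (forwards) with a single closed-form built-in comparison string1[::-1] <= string2, keeping only the explicit empty-string2 case.
import Mathlib
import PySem

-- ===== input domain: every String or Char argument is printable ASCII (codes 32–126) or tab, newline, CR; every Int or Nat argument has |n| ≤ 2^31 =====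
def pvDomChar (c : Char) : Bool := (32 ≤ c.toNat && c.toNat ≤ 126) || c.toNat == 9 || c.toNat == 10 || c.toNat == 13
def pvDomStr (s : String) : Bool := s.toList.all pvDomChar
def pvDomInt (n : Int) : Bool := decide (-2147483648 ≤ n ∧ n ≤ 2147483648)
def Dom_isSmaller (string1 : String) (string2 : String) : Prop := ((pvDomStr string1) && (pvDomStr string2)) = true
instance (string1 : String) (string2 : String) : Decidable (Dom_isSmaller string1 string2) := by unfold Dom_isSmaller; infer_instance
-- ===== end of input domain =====

-- B replaces A's two-index while loop with one built-in lexicographic comparison of reversed string1 vs string2 (simpler).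


-- ===== PORT A =====
-- The while loop of A: i walks string1 backwards, j walks string2 forwards.
-- Both index accesses are always in range inside the guard (i ≥ 0 ∧ i < m, 0 ≤ j < n),
-- so the `none` match arm is unreachable; `false` there is a placeholder, never the result.
def isSmallerLoop (s1 s2 : List Char) (i : Int) (j : Nat) : Bool :=
  if 0 ≤ i ∧ j < s2.length then
    match PySem.List.pyGet? s1 i, PySem.List.pyGet? s2 (j : Int) with
    | some c1, some c2 =>
      if c1 < c2 then true
      else if c2 < c1 then false
      else isSmallerLoop s1 s2 (i - 1) (j + 1)
    | _, _ => false
  else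
    decide (i < 0)
termination_by (i + 1).toNat
decreasing_by omega

def isSmaller (string1 : String) (string2 : String) : Bool :=
  if string2.toList = [] then true
  else
    let s1 := string1.toList
    let s2 := string2.toList
    isSmallerLoop s1 s2 ((s1.length : Int) - 1) 0

-- ===== PORT B =====
-- Python's built-in `<=` on strings: lexicographic by code point, prefix is smaller.
def pyStrLe : List Char → List Char → Bool
  | [], _ => true
  | _ :: _, [] => false
  | a :: l1, b :: l2 =>
    if a < b then true
    else if b < a then false
    else pyStrLe l1 l2

def isSmaller_alt (string1 : String) (string2 : String) : Bool :=
  if string2.toList = [] then true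
  else pyStrLe string1.toList.reverse string2.toList

-- ===== PRECONDITION & SPEC =====
def Spec_isSmaller (string1 : String) (string2 : String) (out : Bool) : Prop := out = isSmaller_alt string1 string2
instance (string1 : String) (string2 : String) (out : Bool) : Decidable (Spec_isSmaller string1 string2 out) := by unfold Spec_isSmaller; infer_instance

-- ===== CLAIM (what is proved, stated in full; the proofs are below) =====
def Claim_equal_isSmaller : Prop := ∀ (string1 : String) (string2 : String), Dom_isSmaller string1 string2 → Spec_isSmaller string1 string2 (isSmaller string1 string2)

-- ===== LEMMAS AND PROOFS =====

-- A's loop at state (i, j) with the invariant i = len(s1) - 1 - j computes the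
-- lexicographic comparison of the remaining suffixes of s1.reverse and s2.
theorem isSmallerLoop_eq_pyStrLe (s1 s2 : List Char) :
    ∀ k j, s2.length - j = k →
      isSmallerLoop s1 s2 ((s1.length : Int) - 1 - j) j
        = pyStrLe (s1.reverse.drop j) (s2.drop j) := by
  intro k
  induction k with
  | zero =>
    intro j hj
    have hn : s2.length ≤ j := by omega
    rw [isSmallerLoop]
    have hguard : ¬ (0 ≤ (s1.length : Int) - 1 - j ∧ j < s2.length) := by omega
    rw [if_neg hguard]
    have h2 : s2.drop j = [] := List.drop_eq_nil_of_le hn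
    rw [h2]
    by_cases h1 : s1.length ≤ j
    · have : s1.reverse.drop j = [] := by
        apply List.drop_eq_nil_of_le; simpa using h1
      rw [this]
      simp [pyStrLe]
      omega
    · have hlt : j < s1.length := by omega
      have : s1.reverse.drop j ≠ [] := by
        apply List.ne_nil_of_length_pos
        simp; omega
      obtain ⟨a, l, hal⟩ := List.exists_cons_of_ne_nil this
      rw [hal]
      simp [pyStrLe]
      omega
  | succ k ih =>
    intro j hj
    have hjn : j < s2.length := by omega
    rw [isSmallerLoop]
    by_cases h1 : s1.length ≤ j
    · -- i < 0 : string1's reversed suffix is exhausted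
      have hguard : ¬ (0 ≤ (s1.length : Int) - 1 - j ∧ j < s2.length) := by omega
      rw [if_neg hguard]
      have : s1.reverse.drop j = [] := by
        apply List.drop_eq_nil_of_le; simpa using h1
      rw [this]
      simp [pyStrLe]
      omega
    · have hj1 : j < s1.length := by omega
      have hguard : 0 ≤ (s1.length : Int) - 1 - j ∧ j < s2.length := by
        constructor <;> omega
      rw [if_pos hguard]
      -- the two reads
      have hi : (s1.length : Int) - 1 - j = ((s1.length - 1 - j : Nat) : Int) := by omega
      have hlt1 : s1.length - 1 - j < s1.length := by omega
      have hget1 : PySem.List.pyGet? s1 ((s1.length : Int) - 1 - j)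
          = s1[s1.length - 1 - j]? := by
        rw [hi, PySem.List.pyGet?_natCast]
      have hrev : s1.reverse[j]? = s1[s1.length - 1 - j]? := by
        rw [List.getElem?_reverse hj1]
      have hjr : j < s1.reverse.length := by simpa using hj1
      have hd1 : s1.reverse.drop j = s1.reverse[j] :: s1.reverse.drop (j + 1) :=
        List.drop_eq_getElem_cons hjr
      have hd2 : s2.drop j = s2[j] :: s2.drop (j + 1) :=
        List.drop_eq_getElem_cons hjn
      have hget1' : PySem.List.pyGet? s1 ((s1.length : Int) - 1 - j) = some s1.reverse[j] := by
        rw [hget1, ← hrev, List.getElem?_eq_getElem hjr]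
      have hget2 : PySem.List.pyGet? s2 (j : Int) = some s2[j] := by
        rw [PySem.List.pyGet?_natCast, List.getElem?_eq_getElem hjn]
      have ihx := ih (j + 1) (by omega)
      push_cast at ihx
      rw [hget1', hget2, hd1, hd2]
      simp only [pyStrLe]
      rw [show (s1.length : Int) - 1 - ↑j - 1 = (s1.length : Int) - 1 - (↑j + 1) by ring, ihx]

theorem isSmaller_eq (string1 string2 : String) :
    isSmaller string1 string2 = isSmaller_alt string1 string2 := by
  unfold isSmaller isSmaller_alt
  by_cases h2 : string2.toList = []
  · rw [if_pos h2, if_pos h2]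
  · rw [if_neg h2, if_neg h2]
    have := isSmallerLoop_eq_pyStrLe string1.toList string2.toList string2.toList.length 0 (by omega)
    simpa using this

-- ===== VERDICT (by name: the statement is the Claim_ definition above) =====
theorem isSmaller_spec : Claim_equal_isSmaller := by
  intro s1 s2 _
  unfold Spec_isSmaller
  exact isSmaller_eq s1 s2
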